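-- pv_equiv track=rewrite | github.com/Mateo2119/Ejercicios-psba | 73-varias.py | apariciones
-- ===== SOURCE A (Python) =====
-- def apariciones(lis):
--     apariciones = []
--     for i in lis:
--         num_apar = 0
--         for j in lis:
--             if i == j:
--                 num_apar = num_apar +1
--         apariciones.append(num_apar)
--     return apariciones
-- ===== SOURCE B (Python) =====
-- def apariciones(lis):
--     # inverted index: value -> list of positions where it occurs
--     index = {}
--     for i, v in enumerate(lis):
--         index[v] = index.get(v, []) + [i]
--     res = [0] * len(lis)
--     # scatter each group's size into the positions of the group
--     for positions in index.values():
--         c = len(positions)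
--         for i in positions:
--             res[i] = c
--     return res
-- ===== Notes on version B (the rewrite author's own statement) =====
-- stated objective: faster
-- what changed: Replaces the quadratic per-element rescan with one pass building a value->positions inverted index, then scatters each group's size into its positions in a preallocated result.
import Mathlib
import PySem

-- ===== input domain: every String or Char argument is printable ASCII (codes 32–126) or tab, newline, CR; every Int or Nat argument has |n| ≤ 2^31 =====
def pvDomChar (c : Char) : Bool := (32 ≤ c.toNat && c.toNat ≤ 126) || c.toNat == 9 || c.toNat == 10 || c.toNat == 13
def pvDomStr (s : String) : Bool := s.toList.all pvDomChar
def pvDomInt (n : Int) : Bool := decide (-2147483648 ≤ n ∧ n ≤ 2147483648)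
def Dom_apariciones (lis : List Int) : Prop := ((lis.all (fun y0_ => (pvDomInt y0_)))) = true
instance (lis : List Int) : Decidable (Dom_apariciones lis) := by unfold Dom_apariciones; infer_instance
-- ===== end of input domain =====

-- B replaces A's quadratic per-element rescan by a one-pass value->positions
-- inverted index whose group sizes are scattered into a preallocated result (faster).


-- ===== PORT A =====
-- for i in lis: num_apar = 0; for j in lis: if i == j: num_apar += 1; apariciones.append(num_apar)
def apariciones (lis : List Int) : List Int :=
  lis.foldl (fun ap i =>
    ap ++ [lis.foldl (fun n j => if i == j then n + 1 else n) (0 : Int)]) []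

-- ===== PORT B =====
-- index[v] = index.get(v, []) + [i]  over enumerate(lis); then res = [0]*len(lis)
-- and res[i] = len(positions) for each i of each group (pySetD: exact, all indices are in range).
def apariciones_alt (lis : List Int) : List Int :=
  let index : PySem.Dict Int (List Int) :=
    (PySem.List.enumerate lis).foldl
      (fun d p => d.modify p.2 [] (fun l => l ++ [p.1])) PySem.Dict.empty
  let res : List Int := List.replicate lis.length (0 : Int)
  index.values.foldl
    (fun r ps => ps.foldl (fun r i => PySem.List.pySetD r i (ps.length : Int)) r) res

-- ===== PRECONDITION & SPEC =====
def Spec_apariciones (lis : List Int) (out : List Int) : Prop := out = apariciones_alt lis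
instance (lis : List Int) (out : List Int) : Decidable (Spec_apariciones lis out) := by unfold Spec_apariciones; infer_instance

-- ===== CLAIM (what is proved, stated in full; the proofs are below) =====
def Claim_equal_apariciones : Prop := ∀ (lis : List Int), Dom_apariciones lis → Spec_apariciones lis (apariciones lis)

-- ===== LEMMAS AND PROOFS =====

-- A's value: the per-position occurrence counts.
lemma inner_count (lis : List Int) (i : Int) :
    lis.foldl (fun n j => if i == j then n + 1 else n) (0 : Int) = (lis.count i : Int) := by
  rw [PySem.List.foldl_if_add_one]
  have h : lis.countP (fun j => i == j) = lis.count i := by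
    rw [List.count]
    exact List.countP_congr (fun x _ => by by_cases h : i = x <;> simp [h, Ne.symm])
  rw [h]; omega

lemma apariciones_eq_map_count (lis : List Int) :
    apariciones lis = lis.map (fun i => (lis.count i : Int)) := by
  unfold apariciones
  rw [PySem.List.foldl_append_singleton_eq_map]
  simp only [List.nil_append]
  exact List.map_congr_left (fun i _ => inner_count lis i)

-- positions of value v in lis, in order (what B's index stores at key v)
def posns (lis : List Int) (v : Int) : List Int :=
  ((PySem.List.enumerate lis).filter (fun p => p.2 == v)).map (fun p => p.1)

lemma getD_index (lis : List Int) (v : Int) :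
    ((PySem.List.enumerate lis).foldl
        (fun d p => d.modify p.2 [] (fun l => l ++ [p.1]))
        (PySem.Dict.empty : PySem.Dict Int (List Int))).getD v []
      = posns lis v := by
  have h := PySem.Dict.getD_foldl_modify_append
      (l := (PySem.List.enumerate lis).map (fun p => (p.2, p.1)))
      (d := (PySem.Dict.empty : PySem.Dict Int (List Int))) (c := v)
  rw [List.foldl_map] at h
  simp only [PySem.Dict.getD_empty, List.nil_append, List.filter_map, List.map_map] at h
  simpa [posns, Function.comp] using h

lemma mem_posns (lis : List Int) (v : Int) (k : Nat) :
    ((k : Int) ∈ posns lis v) ↔ ∃ hk : k < lis.length, lis[k] = v := by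
  simp only [posns, List.mem_map, List.mem_filter,
    PySem.List.mem_enumerate_iff, beq_iff_eq]
  constructor
  · rintro ⟨p, ⟨⟨m, hm, rfl⟩, hv⟩, hfst⟩
    simp only [zero_add] at hfst hv
    have : m = k := by exact_mod_cast hfst
    subst this; exact ⟨hm, hv⟩
  · rintro ⟨hk, hv⟩
    exact ⟨((k : Int), lis[k]), ⟨⟨k, hk, by simp⟩, hv⟩, rfl⟩

lemma posns_nonneg (lis : List Int) (v : Int) : ∀ i ∈ posns lis v, 0 ≤ i := by
  intro i hi
  simp only [posns, List.mem_map, List.mem_filter, PySem.List.mem_enumerate_iff] at hi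
  obtain ⟨p, ⟨⟨m, hm, rfl⟩, _⟩, rfl⟩ := hi
  simp

lemma len_filt (lis : List Int) (v : Int) : ∀ s : Int,
    ((PySem.List.enumerate lis s).filter (fun p => p.2 == v)).length = lis.count v := by
  induction lis with
  | nil => intro s; rw [PySem.List.enumerate_nil]; rfl
  | cons x xs ih =>
    intro s
    rw [PySem.List.enumerate_cons, List.count_cons, List.filter_cons]
    by_cases h : x = v
    · rw [if_pos (by simp only [beq_iff_eq]; exact h), List.length_cons, ih (s+1),
          if_pos (by simp only [beq_iff_eq]; exact h)]
    · rw [if_neg (by simp only [beq_iff_eq]; exact h), ih (s+1),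
          if_neg (by simp only [beq_iff_eq]; exact h), Nat.add_zero]

lemma length_posns (lis : List Int) (v : Int) :
    (posns lis v).length = lis.count v := by
  rw [posns, List.length_map, len_filt lis v 0]

-- one group's scatter: length preserved
lemma length_write (ps : List Int) (c : Int) (r : List Int) :
    (ps.foldl (fun r i => PySem.List.pySetD r i c) r).length = r.length := by
  induction ps generalizing r with
  | nil => rfl
  | cons i ps ih => simp [ih, PySem.List.length_pySetD]

-- one group's scatter: pointwise value
lemma getElem?_write (ps : List Int) (c : Int) (r : List Int) (k : Nat)
    (hk : k < r.length) (hps : ∀ i ∈ ps, 0 ≤ i) :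
    (ps.foldl (fun r i => PySem.List.pySetD r i c) r)[k]?
      = if (k : Int) ∈ ps then some c else r[k]? := by
  induction ps generalizing r with
  | nil => simp
  | cons i ps ih =>
    obtain ⟨m, rfl⟩ : ∃ m : Nat, i = (m : Int) :=
      ⟨i.toNat, (Int.toNat_of_nonneg (hps i (by simp))).symm⟩
    rw [List.foldl_cons,
        ih (PySem.List.pySetD r _ c) (by rwa [PySem.List.length_pySetD])
          (fun j hj => hps j (List.mem_cons_of_mem _ hj)),
        PySem.List.pySetD_natCast]
    by_cases hmem : (k : Int) ∈ ps
    · simp [hmem]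
    · rw [if_neg hmem, List.getElem?_set]
      by_cases hmk : m = k
      · subst hmk; simp [hk]
      · rw [if_neg hmk,
            if_neg (by
              simp only [List.mem_cons, hmem, or_false]
              intro h
              exact hmk (Nat.cast_inj.mp h).symm)]

-- outer scatter over a list of values, pointwise
lemma getElem?_scatter (lis : List Int) (vs : List Int) (r : List Int)
    (k : Nat) (hk : k < r.length) (hklis : k < lis.length) :
    (vs.foldl (fun r v =>
        (posns lis v).foldl
          (fun r i => PySem.List.pySetD r i ((posns lis v).length : Int)) r) r)[k]?
      = if lis[k] ∈ vs then some ((lis.count lis[k] : Nat) : Int) else r[k]? := by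
  induction vs generalizing r with
  | nil => simp
  | cons v vs ih =>
    rw [List.foldl_cons,
        ih _ (by rw [length_write]; exact hk)]
    by_cases hmem : lis[k] ∈ vs
    · simp [hmem]
    · rw [if_neg hmem,
          getElem?_write _ _ _ _ hk (posns_nonneg lis v)]
      by_cases hkv : (k : Int) ∈ posns lis v
      · have hv : lis[k] = v := by
          rcases (mem_posns lis v k).1 hkv with ⟨_, h⟩; exact h
        rw [if_pos hkv, if_pos (by simp [hv]), length_posns, hv]
      · have hv : lis[k] ≠ v := by
          intro h
          exact hkv ((mem_posns lis v k).2 ⟨hklis, h⟩)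
        simp [hkv, hv, hmem]

lemma length_scatter (lis : List Int) (vs : List Int) (r : List Int) :
    (vs.foldl (fun r v =>
        (posns lis v).foldl
          (fun r i => PySem.List.pySetD r i ((posns lis v).length : Int)) r) r).length
      = r.length := by
  induction vs generalizing r with
  | nil => rfl
  | cons v vs ih => rw [List.foldl_cons, ih, length_write]

-- B's value: the same per-position occurrence counts.
lemma apariciones_alt_eq_map_count (lis : List Int) :
    apariciones_alt lis = lis.map (fun i => (lis.count i : Int)) := by
  show (((PySem.List.enumerate lis).foldl
      (fun d p => d.modify p.2 [] (fun l => l ++ [p.1]))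
      (PySem.Dict.empty : PySem.Dict Int (List Int))).values).foldl
      (fun r ps => ps.foldl (fun r i => PySem.List.pySetD r i (ps.length : Int)) r)
      (List.replicate lis.length (0 : Int)) = _
  set d := (PySem.List.enumerate lis).foldl
      (fun d p => d.modify p.2 [] (fun l => l ++ [p.1]))
      (PySem.Dict.empty : PySem.Dict Int (List Int)) with hd
  have hnodup : d.keys.Nodup := by
    rw [hd]
    exact PySem.Dict.nodup_keys_foldl_modify_key
      (l := PySem.List.enumerate lis) (key := fun p => p.2) (d0 := [])
      (f := fun _ p => (fun l => l ++ [p.1])) (d := PySem.Dict.empty)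
      PySem.Dict.nodup_keys_empty
  have hkeys : d.keys = PySem.Set.ofList lis := by
    rw [hd, PySem.Dict.keys_foldl_modify_key, PySem.Dict.keys_empty,
        PySem.Set.update_nil_left, PySem.List.map_snd_enumerate]
  have hvals : d.values = d.keys.map (fun v => posns lis v) := by
    rw [PySem.Dict.values_eq_map_keys d hnodup []]
    apply List.map_congr_left
    intro v _
    rw [hd, getD_index]
  rw [hvals, hkeys, List.foldl_map]
  apply List.ext_getElem?
  intro k
  by_cases hk : k < lis.length
  · rw [getElem?_scatter lis _ _ k (by simp [hk]) hk,
        if_pos (by rw [PySem.Set.mem_ofList]; exact List.getElem_mem hk)]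
    simp [hk]
  · have hk' : lis.length ≤ k := not_lt.1 hk
    rw [List.getElem?_eq_none (by rw [length_scatter]; simpa using hk'),
        List.getElem?_eq_none (by simpa using hk')]

-- ===== VERDICT (by name: the statement is the Claim_ definition above) =====
theorem apariciones_spec : Claim_equal_apariciones := by
  intro lis _
  unfold Spec_apariciones
  rw [apariciones_eq_map_count, apariciones_alt_eq_map_count]
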